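-- pv_equiv track=rewrite | github.com/TainaMarkelen/recursion | elefantes.py | elefantes
-- ===== SOURCE A (Python) =====
-- def incomodam(n):
--     if n <= 0:
--         return ''
--
--     else:
--         if n > 0:
--             return 'incomodam ' + incomodam(n-1)
--
-- def elefantes(n, inicio = 1):
--     if n < 1:
--         return ''
--     if inicio == n:
--         return ''
--     elif inicio == 1:
--         return "Um elefante incomoda muita gente\n" + str(inicio+1) + " elefantes " + incomodam(inicio+1) + "muito mais\n" + elefantes(n, inicio + 1)
--     else:
--         return str(inicio) + " elefantes incomodam muita gente\n" + str(inicio+1) + " elefantes " + incomodam(inicio+1) + "muito mais\n" + elefantes(n, inicio + 1)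
-- ===== SOURCE B (Python) =====
-- def elefantes(n, inicio=1):
--     if n < 1:
--         return ''
--     lines = []
--     i = inicio
--     while i != n:
--         head = ('Um elefante incomoda muita gente\n' if i == 1
--                 else str(i) + ' elefantes incomodam muita gente\n')
--         lines.append(head + str(i + 1) + ' elefantes ' + 'incomodam ' * (i + 1) + 'muito mais\n')
--         i += 1
--     return ''.join(lines)
-- ===== Notes on version B (the rewrite author's own statement) =====
-- stated objective: simpler
-- what changed: Replaces A's two-level linear recursion (line recursion plus the recursive incomodam helper) with a single explicit while-loop that appends line strings to a list (repeating 'incomodam ' via string multiplication) and joins them once; Pre_ excludes exactly the inputs where A raises RecursionError instead of returning (inicio > n with n >= 1, i.e. unbounded recursion, and inicio < n with 2*n - inicio >= 9998, where A's nested recursion exceeds the interpreter's recursion limit).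
import Mathlib
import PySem

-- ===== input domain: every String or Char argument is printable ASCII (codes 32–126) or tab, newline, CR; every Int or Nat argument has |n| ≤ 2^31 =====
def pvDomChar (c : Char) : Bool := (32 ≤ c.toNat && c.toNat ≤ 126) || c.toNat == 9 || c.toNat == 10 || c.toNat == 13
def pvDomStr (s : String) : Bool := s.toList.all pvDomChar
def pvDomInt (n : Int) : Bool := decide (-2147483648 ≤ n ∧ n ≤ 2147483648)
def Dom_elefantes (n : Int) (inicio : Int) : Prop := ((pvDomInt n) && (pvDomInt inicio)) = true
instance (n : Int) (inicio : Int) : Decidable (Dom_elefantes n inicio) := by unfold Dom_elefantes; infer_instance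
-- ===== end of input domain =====

-- B replaces A's two-level recursion (line recursion plus the recursive 'incomodam' helper)
-- by one explicit loop collecting lines, with 'incomodam ' repeated by string multiplication.

-- ===== PORT A =====
-- helper incomodam(n): recursion on n; fuel-free termination on n.toNat
def incomodamA (n : Int) : String :=
  if n ≤ 0 then ""
  else "incomodam " ++ incomodamA (n - 1)
termination_by n.toNat
decreasing_by omega

-- A's recursion on inicio; made total with fuel (n - inicio).toNat, which is exactly the
-- number of recursive calls A makes on inputs where it terminates (inicio ≤ n or n < 1).
def elefantesF : Nat → Int → Int → String
  | 0, _, _ => ""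
  | f + 1, n, inicio =>
    if n < 1 then ""
    else if inicio = n then ""
    else if inicio = 1 then
      "Um elefante incomoda muita gente\n" ++ PySem.Int.toStr (inicio + 1) ++ " elefantes "
        ++ incomodamA (inicio + 1) ++ "muito mais\n" ++ elefantesF f n (inicio + 1)
    else
      PySem.Int.toStr inicio ++ " elefantes incomodam muita gente\n" ++ PySem.Int.toStr (inicio + 1)
        ++ " elefantes " ++ incomodamA (inicio + 1) ++ "muito mais\n" ++ elefantesF f n (inicio + 1)

def elefantes (n : Int) (inicio : Int) : String := elefantesF (n - inicio).toNat n inicio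

-- ===== PORT B =====
-- one loop body: the line for counter i
def lineB (i : Int) : String :=
  (if i = 1 then "Um elefante incomoda muita gente\n"
   else PySem.Int.toStr i ++ " elefantes incomodam muita gente\n")
  ++ PySem.Int.toStr (i + 1) ++ " elefantes "
  ++ String.join (List.replicate (i + 1).toNat "incomodam ") ++ "muito mais\n"

-- B's 'while i != n' loop collecting lines; same fuel bound makes it total in Lean
def loopB (n : Int) : Nat → Int → List String → List String
  | 0, _, acc => acc
  | f + 1, i, acc => if i = n then acc else loopB n f (i + 1) (acc ++ [lineB i])

def elefantes_alt (n : Int) (inicio : Int) : String :=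
  if n < 1 then "" else String.join (loopB n (n - inicio).toNat inicio [])

-- ===== PRECONDITION & SPEC =====
-- Pre_ excludes exactly the inputs where Python A raises instead of returning: inicio > n with
-- n ≥ 1 (unbounded recursion, where B's while loop also diverges), and inicio < n with
-- 2*n - inicio ≥ 9998, where A's ≈ 2n - inicio nested stack frames exceed CPython's recursion
-- limit (set to 10000 by the measuring harness) and A raises RecursionError; A returns on
-- every input Pre_ admits, and on no input it excludes.
def Pre_elefantes (n : Int) (inicio : Int) : Prop :=
  n < 1 ∨ inicio = n ∨ (inicio < n ∧ 2 * n - inicio ≤ 9997)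
instance (n : Int) (inicio : Int) : Decidable (Pre_elefantes n inicio) := by
  unfold Pre_elefantes; infer_instance
def pvWitness_elefantes : Int × Int := (4, 1)

def Spec_elefantes (n : Int) (inicio : Int) (out : String) : Prop := out = elefantes_alt n inicio
instance (n : Int) (inicio : Int) (out : String) : Decidable (Spec_elefantes n inicio out) := by
  unfold Spec_elefantes; infer_instance

-- ===== CLAIM (what is proved, stated in full; the proofs are below) =====
def Claim_equal_elefantes : Prop := ∀ (n : Int) (inicio : Int), Dom_elefantes n inicio → Pre_elefantes n inicio → Spec_elefantes n inicio (elefantes n inicio)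

-- ===== LEMMAS AND PROOFS =====

theorem foldl_append_shift (l : List String) (s : String) :
    List.foldl (fun r t => r ++ t) s l = s ++ List.foldl (fun r t => r ++ t) "" l := by
  induction l generalizing s with
  | nil => simp
  | cons a l ih => rw [List.foldl, List.foldl, ih (s ++ a), ih ("" ++ a)]; simp [String.append_assoc]

theorem join_cons (s : String) (l : List String) :
    String.join (s :: l) = s ++ String.join l := by
  simp only [String.join, List.foldl]
  rw [foldl_append_shift l ("" ++ s)]
  simp

-- A's recursive helper builds exactly n copies of "incomodam "
theorem incomodamA_eq (n : Int) :
    incomodamA n = String.join (List.replicate n.toNat "incomodam ") := by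
  by_cases h : n ≤ 0
  · rw [incomodamA, if_pos h]
    have h0 : n.toNat = 0 := by omega
    rw [h0]; rfl
  · have h1 : ¬ n ≤ 0 := h
    have ht : (n - 1).toNat + 1 = n.toNat := by omega
    rw [incomodamA, if_neg h1, incomodamA_eq (n - 1), ← ht, List.replicate_succ, join_cons]
termination_by n.toNat
decreasing_by omega

theorem lineB_eq_one : lineB 1 =
    "Um elefante incomoda muita gente\n" ++ PySem.Int.toStr 2 ++ " elefantes "
      ++ incomodamA 2 ++ "muito mais\n" := by
  simp [lineB, incomodamA_eq]

theorem lineB_eq_ne (i : Int) (h : i ≠ 1) : lineB i =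
    PySem.Int.toStr i ++ " elefantes incomodam muita gente\n" ++ PySem.Int.toStr (i + 1)
      ++ " elefantes " ++ incomodamA (i + 1) ++ "muito mais\n" := by
  simp [lineB, incomodamA_eq, h, String.append_assoc]

theorem join_append_singleton (acc : List String) (s : String) :
    String.join (acc ++ [s]) = String.join acc ++ s := by
  simp [String.join, List.foldl_append, List.foldl]

-- the loop with accumulator equals the accumulator followed by A's recursion, given n ≥ 1
theorem loopB_eq (n : Int) (hn : ¬ n < 1) (f : Nat) (i : Int) (acc : List String) :
    String.join (loopB n f i acc) = String.join acc ++ elefantesF f n i := by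
  induction f generalizing i acc with
  | zero => simp [loopB, elefantesF]
  | succ f ih =>
    rw [loopB, elefantesF, if_neg hn]
    by_cases hi : i = n
    · simp [hi]
    · rw [if_neg hi, if_neg hi, ih (i + 1) (acc ++ [lineB i]), join_append_singleton]
      by_cases h1 : i = 1
      · subst h1
        rw [if_pos rfl, lineB_eq_one]
        simp [String.append_assoc]
      · rw [if_neg h1, lineB_eq_ne i h1]
        simp [String.append_assoc]

-- ===== VERDICT (by name: the statement is the Claim_ definition above) =====
theorem elefantes_spec : Claim_equal_elefantes := by
  intro n inicio _ _
  unfold Spec_elefantes elefantes elefantes_alt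
  by_cases hn : n < 1
  · rw [if_pos hn]
    cases hf : (n - inicio).toNat with
    | zero => rw [elefantesF]
    | succ f => rw [elefantesF, if_pos hn]
  · rw [if_neg hn, loopB_eq n hn]
    simp [String.join]
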